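-- pv_equiv track=rewrite | github.com/csbobby/STAR_Benchmark | code/generation_tools/utils/postprocessing.py | group_by_act
-- ===== SOURCE A (Python) =====
-- def group_by_act(QA):
--     result = {}
--     for qa in QA:
--         act = qa['answer_action']
--         ans = qa['answer']
--         if ans not in result:
--             result[ans] = {}
--         if act not in result[ans]:
--             result[ans][act]=1
--         else:
--             result[ans][act]+=1
--     return result
-- ===== SOURCE B (Python) =====
-- def group_by_act(QA):
--     # pass 1: flat count keyed by (answer, answer_action)
--     counts = {}
--     for qa in QA:
--         key = (qa['answer'], qa['answer_action'])
--         counts[key] = counts.get(key, 0) + 1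
--     # pass 2: reshape the flat table into the nested dict
--     result = {}
--     for (ans, act), n in counts.items():
--         if ans not in result:
--             result[ans] = {}
--         result[ans][act] = n
--     return result
-- ===== Notes on version B (the rewrite author's own statement) =====
-- stated objective: alternative
-- what changed: A fuses counting into one loop that mutates a nested dict; B is a two-pass pipeline: first a flat counter keyed by the (answer, answer_action) pair, then a reshape pass over the counter's items that builds the nested dict.
import Mathlib
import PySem

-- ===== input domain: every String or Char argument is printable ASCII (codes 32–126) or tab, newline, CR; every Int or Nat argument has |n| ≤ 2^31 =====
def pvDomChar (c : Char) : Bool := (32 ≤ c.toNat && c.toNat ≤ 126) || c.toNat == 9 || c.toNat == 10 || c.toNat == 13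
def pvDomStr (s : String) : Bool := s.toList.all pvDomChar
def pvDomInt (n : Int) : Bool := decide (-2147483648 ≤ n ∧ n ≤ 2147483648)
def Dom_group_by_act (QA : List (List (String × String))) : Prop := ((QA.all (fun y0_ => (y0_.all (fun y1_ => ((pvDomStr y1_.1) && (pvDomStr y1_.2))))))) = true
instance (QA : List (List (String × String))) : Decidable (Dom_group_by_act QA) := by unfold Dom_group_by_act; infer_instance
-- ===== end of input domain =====

-- B replaces A's single fused accumulate-into-nested-dict loop by a two-pass pipeline
-- (flat pair-keyed counter, then a reshape pass over its items); same result, same cost.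


-- ===== PORT A =====
def group_by_act (QA : List (List (String × String))) : List (String × List (String × Int)) :=
  ((QA.foldl (fun result qa =>
      let act := (PySem.Dict.mk qa).getD "answer_action" ""
      let ans := (PySem.Dict.mk qa).getD "answer" ""
      let result := if result.contains ans then result else result.insert ans PySem.Dict.empty
      let inner := result.getD ans PySem.Dict.empty
      let inner := if inner.contains act then inner.insert act (inner.getD act 0 + 1)
                   else inner.insert act (1 : Int)
      result.insert ans inner)
    (PySem.Dict.empty : PySem.Dict String (PySem.Dict String Int))).items).map
    (fun p => (p.1, p.2.items))

-- ===== PORT B =====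
def group_by_act_alt (QA : List (List (String × String))) : List (String × List (String × Int)) :=
  let counts := QA.foldl (fun d qa =>
      let key := ((PySem.Dict.mk qa).getD "answer" "", (PySem.Dict.mk qa).getD "answer_action" "")
      d.insert key (d.getD key 0 + 1))
    (PySem.Dict.empty : PySem.Dict (String × String) Int)
  let result := counts.items.foldl (fun r p =>
      let r := if r.contains p.1.1 then r else r.insert p.1.1 PySem.Dict.empty
      r.insert p.1.1 ((r.getD p.1.1 PySem.Dict.empty).insert p.1.2 p.2))
    (PySem.Dict.empty : PySem.Dict String (PySem.Dict String Int))
  result.items.map (fun p => (p.1, p.2.items))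

-- ===== PRECONDITION & SPEC =====
-- Pre_ excludes exactly the qa dicts missing the key 'answer' or 'answer_action', on which the Python A raises KeyError.
def Pre_group_by_act (QA : List (List (String × String))) : Prop :=
  (QA.all (fun qa => (PySem.Dict.mk qa).contains "answer_action" && (PySem.Dict.mk qa).contains "answer")) = true
instance (QA : List (List (String × String))) : Decidable (Pre_group_by_act QA) := by unfold Pre_group_by_act; infer_instance
def pvWitness_group_by_act : (List (List (String × String))) :=
  [[("answer", "yes"), ("answer_action", "run")], [("answer", "yes"), ("answer_action", "sit")]]
def Spec_group_by_act (QA : List (List (String × String))) (out : List (String × List (String × Int))) : Prop := out = group_by_act_alt QA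
instance (QA : List (List (String × String))) (out : List (String × List (String × Int))) : Decidable (Spec_group_by_act QA out) := by unfold Spec_group_by_act; infer_instance

-- ===== CLAIM (what is proved, stated in full; the proofs are below) =====
def Claim_equal_group_by_act : Prop := ∀ (QA : List (List (String × String))), Dom_group_by_act QA → Pre_group_by_act QA → Spec_group_by_act QA (group_by_act QA)

-- ===== LEMMAS AND PROOFS =====

-- the (answer, answer_action) key both loops extract from a qa record
def pvKey (qa : List (String × String)) : String × String :=
  ((PySem.Dict.mk qa).getD "answer" "", (PySem.Dict.mk qa).getD "answer_action" "")

-- A's loop body, as a function of the extracted key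
def astep (r : PySem.Dict String (PySem.Dict String Int)) (k : String × String) :
    PySem.Dict String (PySem.Dict String Int) :=
  let r := if r.contains k.1 then r else r.insert k.1 PySem.Dict.empty
  let inner := r.getD k.1 PySem.Dict.empty
  let inner := if inner.contains k.2 then inner.insert k.2 (inner.getD k.2 0 + 1)
               else inner.insert k.2 (1 : Int)
  r.insert k.1 inner

-- B's reshape-loop body
def rstep (r : PySem.Dict String (PySem.Dict String Int)) (p : (String × String) × Int) :
    PySem.Dict String (PySem.Dict String Int) :=
  let r := if r.contains p.1.1 then r else r.insert p.1.1 PySem.Dict.empty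
  r.insert p.1.1 ((r.getD p.1.1 PySem.Dict.empty).insert p.1.2 p.2)

def reshape (ps : List ((String × String) × Int)) : PySem.Dict String (PySem.Dict String Int) :=
  ps.foldl rstep PySem.Dict.empty

lemma rstep_eq (r : PySem.Dict String (PySem.Dict String Int)) (p : (String × String) × Int) :
    rstep r p = r.insert p.1.1 ((r.getD p.1.1 PySem.Dict.empty).insert p.1.2 p.2) := by
  unfold rstep
  by_cases hc : r.contains p.1.1 = true
  · rw [if_pos hc]
  · rw [if_neg hc]
    dsimp only
    rw [PySem.Dict.getD_insert_self, PySem.Dict.insert_insert_self,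
        PySem.Dict.getD_of_not_contains r _ (by simpa using hc)]

lemma astep_eq (r : PySem.Dict String (PySem.Dict String Int)) (k : String × String) :
    astep r k = r.insert k.1 ((r.getD k.1 PySem.Dict.empty).insert k.2
      ((r.getD k.1 PySem.Dict.empty).getD k.2 0 + 1)) := by
  unfold astep
  by_cases hc : r.contains k.1 = true
  · rw [if_pos hc]
    dsimp only
    by_cases hi : (r.getD k.1 PySem.Dict.empty).contains k.2 = true
    · rw [if_pos hi]
    · rw [if_neg hi, PySem.Dict.getD_of_not_contains _ 0 (by simpa using hi)]
      norm_num
  · rw [if_neg hc]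
    dsimp only
    rw [PySem.Dict.getD_insert_self, PySem.Dict.insert_insert_self,
        PySem.Dict.getD_of_not_contains r _ (by simpa using hc)]
    simp [PySem.Dict.getD_empty, PySem.Dict.contains_empty]

lemma dict_insert_comm {κ ν : Type} [BEq κ] [LawfulBEq κ] (d : PySem.Dict κ ν) (k k' : κ) (v w : ν)
    (h : d.contains k = true) (hne : k ≠ k') :
    (d.insert k v).insert k' w = (d.insert k' w).insert k v := by
  apply PySem.Dict.ext
  have hkk' : (k == k') = false := by simp [hne]
  have hk'k : (k' == k) = false := by simp [Ne.symm hne]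
  have h1 : (d.insert k v).contains k' = d.contains k' := by
    rw [PySem.Dict.contains_insert, hk'k]; simp
  have h2 : (d.insert k' w).contains k = d.contains k := by
    rw [PySem.Dict.contains_insert, hkk']; simp
  by_cases hc' : d.contains k' = true
  · rw [PySem.Dict.items_insert_of_contains _ w (h1.trans hc'),
        PySem.Dict.items_insert_of_contains _ v h,
        PySem.Dict.items_insert_of_contains _ v (h2.trans h),
        PySem.Dict.items_insert_of_contains _ w hc',
        List.map_map, List.map_map]
    apply List.map_congr_left
    intro p _
    by_cases hp : (p.1 == k) = true
    · have hp' : (p.1 == k') = false := by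
        simp only [beq_iff_eq] at hp; simp [hp, hne]
      simp [Function.comp, hp, hp', hkk']
    · by_cases hp' : (p.1 == k') = true
      · simp [Function.comp, hp, hp', hk'k]
      · simp [Function.comp, hp, hp']
  · have hc'f : d.contains k' = false := by simpa using hc'
    rw [PySem.Dict.items_insert_of_not_contains _ w (h1.trans hc'f),
        PySem.Dict.items_insert_of_contains _ v h,
        PySem.Dict.items_insert_of_contains _ v (h2.trans h),
        PySem.Dict.items_insert_of_not_contains _ w hc'f,
        List.map_append]
    simp [hk'k]

lemma reshape_append (ps : List ((String × String) × Int)) (p : (String × String) × Int) :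
    reshape (ps ++ [p]) = rstep (reshape ps) p := by
  simp [reshape, List.foldl_append]

lemma reshape_contains (ps : List ((String × String) × Int)) (a : String) :
    (reshape ps).contains a = ps.any (fun p => p.1.1 == a) := by
  induction ps using List.reverseRecOn with
  | nil => simp [reshape, PySem.Dict.contains_empty]
  | append_singleton qs q ih =>
      rw [reshape_append, rstep_eq, PySem.Dict.contains_insert, ih]
      simp only [List.any_append, List.any_cons, List.any_nil, Bool.or_false]
      by_cases h : a = q.1.1
      · simp [h]
      · have h1 : (a == q.1.1) = false := by simp [h]
        have h2 : (q.1.1 == a) = false := by simp [Ne.symm h]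
        rw [h1, h2]
        simp

lemma reshape_inner_contains (ps : List ((String × String) × Int)) (a t : String) :
    ((reshape ps).getD a PySem.Dict.empty).contains t = ps.any (fun p => p.1 == (a, t)) := by
  induction ps using List.reverseRecOn with
  | nil => simp [reshape, PySem.Dict.getD_empty, PySem.Dict.contains_empty]
  | append_singleton qs q ih =>
      rw [reshape_append, rstep_eq, PySem.Dict.getD_insert]
      by_cases ha : a = q.1.1
      · rw [if_pos ha, PySem.Dict.contains_insert, ← ha, ih]
        simp only [List.any_append, List.any_cons, List.any_nil, Bool.or_false]
        cases hq : (q.1 == (a, t))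
        · have : (t == q.1.2) = false := by
            rcases q with ⟨⟨a', t'⟩, w⟩
            subst ha
            simp only [beq_eq_false_iff_ne, ne_eq, Prod.mk.injEq, not_and, true_implies] at hq
            simp only [beq_eq_false_iff_ne, ne_eq]
            exact fun h => hq h.symm
          simp [this]
        · have : (t == q.1.2) = true := by
            rcases q with ⟨⟨a', t'⟩, w⟩
            simp only [beq_iff_eq, Prod.mk.injEq] at hq ⊢
            exact hq.2.symm
          simp [this]
      · rw [if_neg ha, ih]
        have : (q.1 == (a, t)) = false := by
          rcases q with ⟨⟨a', t'⟩, w⟩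
          simp only [beq_eq_false_iff_ne, ne_eq, Prod.mk.injEq, not_and]
          exact fun h _ => ha h.symm
        simp [List.any_append, this]

lemma mk_getD_append_ne (ps : List ((String × String) × Int)) (q : (String × String) × Int)
    (k : String × String) (h : k ≠ q.1) :
    (PySem.Dict.mk (ps ++ [q])).getD k 0 = (PySem.Dict.mk ps).getD k 0 := by
  have hq : (q.1 == k) = false := by simp [Ne.symm h]
  simp [PySem.Dict.getD, PySem.Dict.get?, List.find?_append, List.find?, hq]

lemma mk_getD_last (ps : List ((String × String) × Int)) (q : (String × String) × Int)
    (h : ∀ p ∈ ps, p.1 ≠ q.1) :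
    (PySem.Dict.mk (ps ++ [q])).getD q.1 0 = q.2 := by
  have hps : List.find? (fun p => p.1 == q.1) ps = none := by
    rw [List.find?_eq_none]
    intro p hp
    simp [h p hp]
  simp [PySem.Dict.getD, PySem.Dict.get?, List.find?_append, List.find?, hps]

lemma reshape_inner_getD (ps : List ((String × String) × Int)) (a t : String)
    (hnd : (ps.map (·.1)).Nodup) :
    ((reshape ps).getD a PySem.Dict.empty).getD t 0 = (PySem.Dict.mk ps).getD (a, t) 0 := by
  induction ps using List.reverseRecOn with
  | nil => rfl
  | append_singleton qs q ih =>
      rw [List.map_append] at hnd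
      rcases List.nodup_append.mp hnd with ⟨h1, _, hdisj⟩
      have hqnotin : ∀ p ∈ qs, p.1 ≠ q.1 := by
        intro p hp hcontra
        exact hdisj p.1 (List.mem_map_of_mem hp) q.1 (by simp) hcontra
      rw [reshape_append, rstep_eq]
      by_cases hk : (a, t) = q.1
      · have ha : a = q.1.1 := by rw [← hk]
        have ht : t = q.1.2 := by rw [← hk]
        rw [PySem.Dict.getD_insert, if_pos ha, ht, PySem.Dict.getD_insert_self]
        have hpair : (a, q.1.2) = q.1 := by rw [← ht]; exact hk
        rw [hpair, mk_getD_last qs q hqnotin]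
      · rw [mk_getD_append_ne qs q _ hk, PySem.Dict.getD_insert]
        by_cases ha : a = q.1.1
        · have ht : t ≠ q.1.2 := fun h => hk (Prod.ext ha h)
          rw [if_pos ha, PySem.Dict.getD_insert, if_neg ht, ← ha]
          exact ih h1
        · rw [if_neg ha]
          exact ih h1

lemma reshape_map_update (ps : List ((String × String) × Int)) (k : String × String) (v : Int)
    (hnd : (ps.map (·.1)).Nodup) (hmem : k ∈ ps.map (·.1)) :
    reshape (ps.map (fun p => if p.1 == k then (k, v) else p))
      = (reshape ps).insert k.1 (((reshape ps).getD k.1 PySem.Dict.empty).insert k.2 v) := by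
  obtain ⟨a, t⟩ := k
  induction ps using List.reverseRecOn with
  | nil => simp at hmem
  | append_singleton qs q ih =>
      rw [List.map_append] at hnd
      rcases List.nodup_append.mp hnd with ⟨h1, _, hdisj⟩
      rw [List.map_append]
      by_cases hq : q.1 = (a, t)
      · -- the updated key is the last one; it does not occur in qs
        have hknotin : ∀ p ∈ qs, (p.1 == (a, t)) = false := by
          intro p hp
          simp only [beq_eq_false_iff_ne, ne_eq]
          intro hcontra
          exact hdisj p.1 (List.mem_map_of_mem hp) q.1 (by simp) (by rw [hcontra, hq])
        have hmapid : qs.map (fun p => if p.1 == (a, t) then ((a, t), v) else p) = qs := by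
          conv_rhs => rw [← List.map_id qs]
          apply List.map_congr_left
          intro p hp
          rw [hknotin p hp]
          rfl
        have hlast : [q].map (fun p => if p.1 == (a, t) then ((a, t), v) else p) = [((a, t), v)] := by
          simp [hq]
        rw [hmapid, hlast, reshape_append, reshape_append, rstep_eq, rstep_eq, hq]
        rw [PySem.Dict.getD_insert_self, PySem.Dict.insert_insert_self,
            PySem.Dict.insert_insert_self]
      · have hqf : (q.1 == (a, t)) = false := by simp [hq]
        have hmem' : (a, t) ∈ qs.map (fun x => x.1) := by
          rw [List.map_append, List.mem_append] at hmem
          rcases hmem with h | h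
          · exact h
          · exfalso; simp at h; exact hq h.symm
        obtain ⟨p, hp, hp1⟩ := List.mem_map.mp hmem'
        have hRa : (reshape qs).contains a = true := by
          rw [reshape_contains]
          rw [List.any_eq_true]
          exact ⟨p, hp, by rw [hp1]; simp⟩
        have hJt : ((reshape qs).getD a PySem.Dict.empty).contains t = true := by
          rw [reshape_inner_contains]
          rw [List.any_eq_true]
          exact ⟨p, hp, by rw [hp1]; simp⟩
        have hlast : [q].map (fun p => if p.1 == (a, t) then ((a, t), v) else p) = [q] := by
          simp only [List.map_cons, List.map_nil, hqf]
          rfl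
        rw [hlast, reshape_append, reshape_append, ih h1 hmem', rstep_eq, rstep_eq]
        by_cases haq : q.1.1 = a
        · have htq : t ≠ q.1.2 := by
            intro h
            exact hq (Prod.ext haq (h.symm))
          rw [haq, PySem.Dict.getD_insert_self, PySem.Dict.insert_insert_self,
              PySem.Dict.getD_insert_self, PySem.Dict.insert_insert_self]
          exact congrArg _ (dict_insert_comm _ t q.1.2 v q.2 hJt htq)
        · have hne : ¬(a = q.1.1) := fun h => haq h.symm
          rw [PySem.Dict.getD_insert, if_neg haq, PySem.Dict.getD_insert, if_neg hne]
          exact dict_insert_comm _ a q.1.1 _ _ hRa hne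
    

lemma main_fold (ks : List (String × String)) :
    ks.foldl astep PySem.Dict.empty = reshape (PySem.Dict.counter ks).items := by
  induction ks using List.reverseRecOn with
  | nil => rfl
  | append_singleton ks k ih =>
      rw [List.foldl_append, List.foldl_cons, List.foldl_nil, ih, astep_eq,
          PySem.Dict.counter_append_singleton]
      have hmod : (PySem.Dict.counter ks).modify k 0 (fun x => x + 1)
          = (PySem.Dict.counter ks).insert k ((PySem.Dict.counter ks).getD k 0 + 1) := rfl
      rw [hmod]
      have hnd : ((PySem.Dict.counter ks).items.map (·.1)).Nodup :=
        PySem.Dict.nodup_keys_counter ks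
      have hval : ((reshape (PySem.Dict.counter ks).items).getD k.1 PySem.Dict.empty).getD k.2 0
          = (PySem.Dict.counter ks).getD k 0 := by
        rw [reshape_inner_getD _ _ _ hnd]
      by_cases hc : (PySem.Dict.counter ks).contains k = true
      · have hmem : k ∈ (PySem.Dict.counter ks).items.map (·.1) := by
          have h2 : ((PySem.Dict.counter ks).items.any (fun p => p.1 == k)) = true := hc
          rw [List.any_eq_true] at h2
          obtain ⟨p, hp, hpk⟩ := h2
          rw [List.mem_map]
          exact ⟨p, hp, by simpa using hpk⟩
        rw [PySem.Dict.items_insert_of_contains _ _ hc,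
            reshape_map_update _ k _ hnd hmem, hval]
      · rw [PySem.Dict.items_insert_of_not_contains _ _ (by simpa using hc),
            reshape_append, rstep_eq, hval]

-- ===== VERDICT (by name: the statement is the Claim_ definition above) =====
theorem group_by_act_spec : Claim_equal_group_by_act := by
  intro QA _ _
  unfold Spec_group_by_act group_by_act group_by_act_alt
  have hA : (QA.foldl (fun result qa =>
      let act := (PySem.Dict.mk qa).getD "answer_action" ""
      let ans := (PySem.Dict.mk qa).getD "answer" ""
      let result := if result.contains ans then result else result.insert ans PySem.Dict.empty
      let inner := result.getD ans PySem.Dict.empty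
      let inner := if inner.contains act then inner.insert act (inner.getD act 0 + 1)
                   else inner.insert act (1 : Int)
      result.insert ans inner)
    (PySem.Dict.empty : PySem.Dict String (PySem.Dict String Int)))
      = (QA.map pvKey).foldl astep PySem.Dict.empty := by
    rw [List.foldl_map]; rfl
  have hB : (QA.foldl (fun d qa =>
      let key := ((PySem.Dict.mk qa).getD "answer" "", (PySem.Dict.mk qa).getD "answer_action" "")
      d.insert key (d.getD key 0 + 1))
    (PySem.Dict.empty : PySem.Dict (String × String) Int))
      = PySem.Dict.counter (QA.map pvKey) := by
    rw [← PySem.Dict.foldl_insert_getD_add_one_eq_counter, List.foldl_map]; rfl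
  rw [hA, hB, main_fold]; rfl
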